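-- pv_equiv track=rewrite | github.com/Nyanyan/Solvour | legacy/4x4x4solver_v3/cube_class.py | move_ep_phase1_func
-- ===== SOURCE A (Python) =====
-- def move_ep_phase1_func(idx, twist):
--     cnt = 0
--     for i in range(23):
--         cnt += (idx >> i) & 1
--     idx *= 2
--     if cnt % 2:
--         idx += 1
--     surface = [[[3, 12, 19, 10], [2, 13, 18, 11]], # R
--                 [[3, 12, 19, 10], [2, 13, 18, 11], [4, 1, 20, 17]],  # Rw
--                 [[7, 8, 23, 14], [6, 9, 22, 15]], # L
--                 [[7, 8, 23, 14], [6, 9, 22, 15], [0, 5, 16, 21]], # Lw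
--                 [[0, 2, 4, 6], [1, 3, 5, 7]], # U
--                 [[0, 2, 4, 6], [1, 3, 5, 7], [15, 12, 11, 8]], # Uw
--                 [[16, 18, 20, 22], [17, 19, 21, 23]], # D
--                 [[16, 18, 20, 22], [17, 19, 21, 23], [9, 10, 13, 14]], # Dw
--                 [[5, 11, 17, 9], [4, 10, 16, 8]], # F
--                 [[5, 11, 17, 9], [4, 10, 16, 8], [6, 3, 18, 23]], # Fw
--                 [[1, 15, 21, 13], [0, 14, 20, 12]], # B
--                 [[1, 15, 21, 13], [0, 14, 20, 12], [2, 7, 22, 19]] # Bw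
--                 ]
--     twist_type = twist // 3
--     twist_amount = twist % 3
--     res = idx
--     for arr in surface[twist_type]:
--         for i in range(4):
--             if (idx >> (23 - arr[i])) & 1:
--                 if (res >> (23 - arr[(i + twist_amount + 1) % 4])) & 1 == 0:
--                     res += 2 ** (23 - arr[(i + twist_amount + 1) % 4])
--             else:
--                 if (res >> (23 - arr[(i + twist_amount + 1) % 4])) & 1 == 1:
--                     res -= 2 ** (23 - arr[(i + twist_amount + 1) % 4])
--     return res // 2
-- ===== SOURCE B (Python) =====
-- SURFACE = [[[3, 12, 19, 10], [2, 13, 18, 11]],                    # R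
--            [[3, 12, 19, 10], [2, 13, 18, 11], [4, 1, 20, 17]],    # Rw
--            [[7, 8, 23, 14], [6, 9, 22, 15]],                      # L
--            [[7, 8, 23, 14], [6, 9, 22, 15], [0, 5, 16, 21]],      # Lw
--            [[0, 2, 4, 6], [1, 3, 5, 7]],                          # U
--            [[0, 2, 4, 6], [1, 3, 5, 7], [15, 12, 11, 8]],         # Uw
--            [[16, 18, 20, 22], [17, 19, 21, 23]],                  # D
--            [[16, 18, 20, 22], [17, 19, 21, 23], [9, 10, 13, 14]], # Dw
--            [[5, 11, 17, 9], [4, 10, 16, 8]],                      # F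
--            [[5, 11, 17, 9], [4, 10, 16, 8], [6, 3, 18, 23]],      # Fw
--            [[1, 15, 21, 13], [0, 14, 20, 12]],                    # B
--            [[1, 15, 21, 13], [0, 14, 20, 12], [2, 7, 22, 19]]]    # Bw
--
--
-- def move_ep_phase1_func(idx, twist):
--     # parity of bits 0..22 via an xor accumulator
--     par = 0
--     for i in range(23):
--         par ^= (idx >> i) & 1
--     j = idx * 2 + par
--     k = twist % 3 + 1  # each 4-cycle's content moves forward by k positions
--     res = j
--     for cyc in SURFACE[twist // 3]:
--         # gather the cycle's 4 bits of j into one nibble (cyc[0] = most significant)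
--         nib = 0
--         for pos in cyc:
--             nib = nib * 2 + ((j >> (23 - pos)) & 1)
--         # rotating the cycle = rotating the nibble
--         rot = ((nib >> k) | (nib << (4 - k))) & 15
--         # scatter the difference back, branch-free
--         for t, pos in enumerate(cyc):
--             res += (((rot >> (3 - t)) & 1) - ((nib >> (3 - t)) & 1)) << (23 - pos)
--     return res // 2
-- ===== Notes on version B (the rewrite author's own statement) =====
-- stated objective: alternative
-- what changed: B packs each 4-cycle's bits of the parity-extended value into one nibble, rotates the nibble with word shifts, and scatters the branch-free bit difference back (and computes the parity preamble with an xor accumulator), instead of A's per-entry conditional set/clear walk over (source,destination) index pairs.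
import Mathlib
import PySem

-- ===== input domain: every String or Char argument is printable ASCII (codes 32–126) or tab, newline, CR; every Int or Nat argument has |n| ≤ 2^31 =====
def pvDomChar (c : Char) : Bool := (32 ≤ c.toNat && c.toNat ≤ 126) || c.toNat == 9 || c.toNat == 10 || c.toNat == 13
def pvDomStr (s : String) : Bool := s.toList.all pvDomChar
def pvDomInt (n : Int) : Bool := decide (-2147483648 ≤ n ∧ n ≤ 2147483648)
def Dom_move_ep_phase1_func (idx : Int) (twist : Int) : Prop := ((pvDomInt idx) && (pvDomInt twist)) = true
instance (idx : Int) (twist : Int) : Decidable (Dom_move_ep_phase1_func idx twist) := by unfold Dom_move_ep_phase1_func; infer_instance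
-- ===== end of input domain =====

-- B packs each 4-cycle's bits into a nibble, rotates the nibble with word shifts and scatters the
-- branch-free difference back (parity via an xor accumulator), instead of A's per-entry conditional
-- set/clear walk over (source,destination) pairs (objective: alternative; same asymptotic cost).

-- ===== PORT A =====
-- helper shared by both ports: Python '(x >> k) & 1' (every shift amount below is ≥ 0, so .toNat is exact)
def pvBit (x : Int) (k : Int) : Int := PySem.Int.band (x >>> k.toNat) 1

-- the 'surface' table (a local literal in A, module-level data in B — identical content)
def pvSurface : List (List (List Int)) :=
  [[[3, 12, 19, 10], [2, 13, 18, 11]],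
   [[3, 12, 19, 10], [2, 13, 18, 11], [4, 1, 20, 17]],
   [[7, 8, 23, 14], [6, 9, 22, 15]],
   [[7, 8, 23, 14], [6, 9, 22, 15], [0, 5, 16, 21]],
   [[0, 2, 4, 6], [1, 3, 5, 7]],
   [[0, 2, 4, 6], [1, 3, 5, 7], [15, 12, 11, 8]],
   [[16, 18, 20, 22], [17, 19, 21, 23]],
   [[16, 18, 20, 22], [17, 19, 21, 23], [9, 10, 13, 14]],
   [[5, 11, 17, 9], [4, 10, 16, 8]],
   [[5, 11, 17, 9], [4, 10, 16, 8], [6, 3, 18, 23]],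
   [[1, 15, 21, 13], [0, 14, 20, 12]],
   [[1, 15, 21, 13], [0, 14, 20, 12], [2, 7, 22, 19]]]

def move_ep_phase1_func (idx : Int) (twist : Int) : Int :=
  let cnt := (PySem.List.pyRange 0 23 1).foldl (fun c i => c + pvBit idx i) 0
  let idx2 := idx * 2                                   -- Python reassigns 'idx'
  let idx2 := if PySem.Int.mod cnt 2 ≠ 0 then idx2 + 1 else idx2
  let twist_type := PySem.Int.floordiv twist 3
  let twist_amount := PySem.Int.mod twist 3
  -- surface[twist_type]: in range under Pre_ (the [] default is unreachable there)
  let cycles := (PySem.List.pyGet? pvSurface twist_type).getD []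
  let res := cycles.foldl (fun res arr =>
    (PySem.List.pyRange 0 4 1).foldl (fun res i =>
      -- arr[i], arr[(i + twist_amount + 1) % 4]: indices always in [0,3], so the defaults are unreachable
      let src := (PySem.List.pyGet? arr i).getD 0
      let dst := (PySem.List.pyGet? arr (PySem.Int.mod (i + twist_amount + 1) 4)).getD 0
      -- 2 ** (23 - dst): table entries are 0..23, so .toNat is exact
      if pvBit idx2 (23 - src) ≠ 0 then
        (if pvBit res (23 - dst) = 0 then res + 2 ^ ((23 : Int) - dst).toNat else res)
      else
        (if pvBit res (23 - dst) = 1 then res - 2 ^ ((23 : Int) - dst).toNat else res)) res) idx2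
  PySem.Int.floordiv res 2

-- ===== PORT B =====
def move_ep_phase1_func_alt (idx : Int) (twist : Int) : Int :=
  -- parity of bits 0..22 via an xor accumulator
  let par := (PySem.List.pyRange 0 23 1).foldl (fun p i => PySem.Int.bxor p (pvBit idx i)) 0
  let j := idx * 2 + par
  let k := PySem.Int.mod twist 3 + 1          -- each cycle's content moves forward by k positions
  let cycles := (PySem.List.pyGet? pvSurface (PySem.Int.floordiv twist 3)).getD []
  let res := cycles.foldl (fun res cyc =>
    -- gather the cycle's 4 bits of j into one nibble (cyc[0] = most significant)
    let nib : Int := cyc.foldl (fun n pos => n * 2 + pvBit j (23 - pos)) 0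
    -- rotating the cycle = rotating the nibble (k ∈ {1,2,3}, so the .toNat's are exact)
    let rot : Int := PySem.Int.band (PySem.Int.bor (nib >>> k.toNat) (nib <<< ((4 : Int) - k).toNat)) 15
    -- scatter the difference back, branch-free ('x << n' is 'x <<< n', exact also for negative x)
    (PySem.List.enumerate cyc 0).foldl (fun r tp =>
      r + (PySem.Int.band (rot >>> ((3 : Int) - tp.1).toNat) 1
         - PySem.Int.band (nib >>> ((3 : Int) - tp.1).toNat) 1) <<< ((23 : Int) - tp.2).toNat) res) j
  PySem.Int.floordiv res 2

-- ===== PRECONDITION & SPEC =====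
-- Pre_ excludes exactly the twists on which Python's surface[twist // 3] raises IndexError
-- (negative twists down to -36 index the table from the end in Python; A returns there and B matches it).
def Pre_move_ep_phase1_func (_idx : Int) (twist : Int) : Prop := -36 ≤ twist ∧ twist < 36
instance (idx : Int) (twist : Int) : Decidable (Pre_move_ep_phase1_func idx twist) := by unfold Pre_move_ep_phase1_func; infer_instance
def pvWitness_move_ep_phase1_func : Int × Int := (12345, 7)

def Spec_move_ep_phase1_func (idx : Int) (twist : Int) (out : Int) : Prop := out = move_ep_phase1_func_alt idx twist
instance (idx : Int) (twist : Int) (out : Int) : Decidable (Spec_move_ep_phase1_func idx twist out) := by unfold Spec_move_ep_phase1_func; infer_instance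

-- ===== CLAIM (what is proved, stated in full; the proofs are below) =====
def Claim_equal_move_ep_phase1_func : Prop := ∀ (idx : Int) (twist : Int), Dom_move_ep_phase1_func idx twist → Pre_move_ep_phase1_func idx twist → Spec_move_ep_phase1_func idx twist (move_ep_phase1_func idx twist)

-- ===== LEMMAS AND PROOFS =====

-- proof-side bit function: (x >> k) & 1 as floor-division arithmetic
def pvB (x : Int) (k : Nat) : Int := x / 2 ^ k % 2

lemma pvBit_eq (x : Int) (k : Int) : pvBit x k = pvB x k.toNat := by
  unfold pvBit pvB
  rw [Int.shiftRight_eq_div_pow, PySem.Int.band_one,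
    PySem.Int.mod_eq_emod_of_pos (by norm_num : (0:Int) < 2)]
  push_cast
  rfl

lemma pvB_cases (x : Int) (k : Nat) : pvB x k = 0 ∨ pvB x k = 1 :=
  Int.emod_two_eq_zero_or_one _

lemma pvB_decomp (x : Int) (k : Nat) :
    x = x % 2 ^ k + pvB x k * 2 ^ k + x / 2 ^ (k + 1) * 2 ^ (k + 1) := by
  have h3 : x / 2 ^ k / 2 = x / 2 ^ (k + 1) := by
    rw [Int.ediv_ediv_of_nonneg (by positivity), ← pow_succ]
  have h4 : x / 2 ^ k = 2 * (x / 2 ^ (k + 1)) + pvB x k := by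
    have h2 := Int.mul_ediv_add_emod (x / 2 ^ k) 2
    unfold pvB; omega
  have h1 := Int.mul_ediv_add_emod x (2 ^ k)
  calc x = 2 ^ k * (x / 2 ^ k) + x % 2 ^ k := h1.symm
    _ = 2 ^ k * (2 * (x / 2 ^ (k + 1)) + pvB x k) + x % 2 ^ k := by rw [h4]
    _ = _ := by ring

-- the shared bit at position k' of (a + u*2^k + c*2^(k+1)) does not depend on u ∈ {0,1} when k' ≠ k
lemma pvB_indep (a c s b : Int) (k k' : Nat) (ha : 0 ≤ a) (ha2 : a < 2 ^ k)
    (hs : 0 ≤ s) (hs2 : s ≤ 1) (hb : 0 ≤ b) (hb2 : b ≤ 1) (hne : k' ≠ k) :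
    pvB (a + s * 2 ^ k + c * 2 ^ (k + 1)) k' = pvB (a + b * 2 ^ k + c * 2 ^ (k + 1)) k' := by
  suffices H : ∀ u : Int, 0 ≤ u → u ≤ 1 →
      pvB (a + u * 2 ^ k + c * 2 ^ (k + 1)) k'
        = (if k' < k then pvB a k' else pvB c (k' - (k + 1))) by
    rw [H s hs hs2, H b hb hb2]
  intro u hu hu2
  unfold pvB
  rcases lt_or_ge k' k with hlt | hge
  · obtain ⟨d, rfl⟩ : ∃ d, k = k' + (d + 1) := ⟨k - k' - 1, by omega⟩
    have e1 : a + u * 2 ^ (k' + (d + 1)) + c * 2 ^ (k' + (d + 1) + 1)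
        = a + ((u * 2 ^ d + c * 2 ^ (d + 1)) * 2) * 2 ^ k' := by ring
    rw [e1, Int.add_mul_ediv_right _ _ (by positivity : ((2 : Int) ^ k') ≠ 0)]
    rw [if_pos hlt]
    rw [show a / 2 ^ k' + (u * 2 ^ d + c * 2 ^ (d + 1)) * 2
        = a / 2 ^ k' + 2 * (u * 2 ^ d + c * 2 ^ (d + 1)) by ring]
    exact Int.add_mul_emod_self_left _ _ _
  · obtain ⟨d, rfl⟩ : ∃ d, k' = k + 1 + d := ⟨k' - k - 1, by omega⟩
    have hsplit : ((2 : Int) ^ (k + 1 + d)) = 2 ^ (k + 1) * 2 ^ d := by ring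
    rw [hsplit, ← Int.ediv_ediv_of_nonneg (by positivity)]
    rw [show a + u * 2 ^ k + c * 2 ^ (k + 1) = (a + u * 2 ^ k) + c * 2 ^ (k + 1) by ring]
    rw [Int.add_mul_ediv_right _ _ (by positivity : ((2 : Int) ^ (k + 1)) ≠ 0)]
    have hz : (a + u * 2 ^ k) / 2 ^ (k + 1) = 0 := by
      apply Int.ediv_eq_zero_of_lt (by nlinarith)
      have h2k : (0 : Int) < 2 ^ k := by positivity
      have : (2 : Int) ^ (k + 1) = 2 ^ k + 2 ^ k := by ring
      nlinarith
    rw [hz, if_neg (by omega), show k + 1 + d - (k + 1) = d by omega]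
    rw [zero_add]

-- writing bit k (no carries can occur) leaves every other bit unchanged
lemma pvB_update_other (x s : Int) (k k' : Nat) (hs : 0 ≤ s) (hs2 : s ≤ 1) (hne : k' ≠ k) :
    pvB (x + (s - pvB x k) * 2 ^ k) k' = pvB x k' := by
  have hd := pvB_cases x k
  have hdec := pvB_decomp x k
  have he : x + (s - pvB x k) * 2 ^ k
      = x % 2 ^ k + s * 2 ^ k + x / 2 ^ (k + 1) * 2 ^ (k + 1) := by
    linear_combination hdec
  rw [he]
  have ha : 0 ≤ x % 2 ^ k := Int.emod_nonneg _ (by positivity)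
  have ha2 : x % 2 ^ k < 2 ^ k := Int.emod_lt_of_pos _ (by positivity)
  calc pvB (x % 2 ^ k + s * 2 ^ k + x / 2 ^ (k + 1) * 2 ^ (k + 1)) k'
      = pvB (x % 2 ^ k + pvB x k * 2 ^ k + x / 2 ^ (k + 1) * 2 ^ (k + 1)) k' := by
        apply pvB_indep _ _ _ _ _ _ ha ha2 hs hs2 (by rcases hd with h | h <;> omega)
          (by rcases hd with h | h <;> omega) hne
    _ = pvB x k' := by rw [← hdec]

-- the two step functions over (dst, src) pairs (pvStepA is exactly A's loop body)
def pvStepA (j r : Int) (p : Int × Int) : Int :=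
  if pvBit j (23 - p.2) ≠ 0 then
    (if pvBit r (23 - p.1) = 0 then r + 2 ^ ((23 : Int) - p.1).toNat else r)
  else
    (if pvBit r (23 - p.1) = 1 then r - 2 ^ ((23 : Int) - p.1).toNat else r)

def pvStepB (j r : Int) (p : Int × Int) : Int :=
  r + (pvBit j (23 - p.2) - pvBit j (23 - p.1)) * ((1 : Int) <<< ((23 : Int) - p.1).toNat)

def pvStepsOf (kk : Int) (arr : List Int) : List (Int × Int) :=
  (PySem.List.pyRange 0 4 1).map (fun i =>
    ((PySem.List.pyGet? arr (PySem.Int.mod (i + kk + 1) 4)).getD 0,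
     (PySem.List.pyGet? arr i).getD 0))

def pvSteps (twist : Int) : List (Int × Int) :=
  ((PySem.List.pyGet? pvSurface (PySem.Int.floordiv twist 3)).getD []).flatMap
    (pvStepsOf (PySem.Int.mod twist 3))

-- B's per-cycle body, exactly the fold body of the B port with k abstracted
def pvBodyB (j k r : Int) (cyc : List Int) : Int :=
  let nib : Int := cyc.foldl (fun n pos => n * 2 + pvBit j (23 - pos)) 0
  let rot : Int := PySem.Int.band (PySem.Int.bor (nib >>> k.toNat) (nib <<< ((4 : Int) - k).toNat)) 15
  (PySem.List.enumerate cyc 0).foldl (fun r tp =>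
    r + (PySem.Int.band (rot >>> ((3 : Int) - tp.1).toNat) 1
       - PySem.Int.band (nib >>> ((3 : Int) - tp.1).toNat) 1) <<< ((23 : Int) - tp.2).toNat) r

def pvJ (idx : Int) : Int :=
  idx * 2 + PySem.Int.mod (((PySem.List.pyRange 0 23 1).map (fun i => pvBit idx i)).sum) 2

lemma foldl_flatMap {α β γ : Type} (l : List α) (f : α → List β) (g : γ → β → γ) (init : γ) :
    (l.flatMap f).foldl g init = l.foldl (fun acc x => (f x).foldl g acc) init := by
  induction l generalizing init with
  | nil => rfl
  | cons x xs ih => simp [List.foldl_append, ih]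

-- xor-accumulated parity of a 0/1 list is its sum mod 2
lemma pvXorFold (l : List Int) (h : ∀ x ∈ l, x = 0 ∨ x = 1) : ∀ a : Int, a = 0 ∨ a = 1 →
    l.foldl (fun p x => PySem.Int.bxor p x) a = PySem.Int.mod (a + l.sum) 2 := by
  induction l with
  | nil =>
    intro a ha; rcases ha with rfl | rfl <;> decide
  | cons x xs ih =>
    intro a ha
    have hx := h x (by simp)
    simp only [List.foldl_cons, List.sum_cons]
    rw [ih (fun y hy => h y (by simp [hy])) _
      (by rcases ha with rfl | rfl <;> rcases hx with rfl | rfl <;> decide)]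
    rw [PySem.Int.mod_eq_emod_of_pos (by norm_num : (0:Int) < 2),
        PySem.Int.mod_eq_emod_of_pos (by norm_num : (0:Int) < 2)]
    rcases ha with rfl | rfl <;> rcases hx with rfl | rfl <;>
      simp [show PySem.Int.bxor 0 0 = 0 from by decide, show PySem.Int.bxor 0 1 = 1 from by decide,
        show PySem.Int.bxor 1 0 = 1 from by decide, show PySem.Int.bxor 1 1 = 0 from by decide] <;>
      omega

-- nibble rotation by k ∈ {1,2,3} in bit form (checked over all 16 bit patterns)
lemma pvRot1 (A B C D : Int) (hA : A = 0 ∨ A = 1) (hB : B = 0 ∨ B = 1)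
    (hC : C = 0 ∨ C = 1) (hD : D = 0 ∨ D = 1) :
    PySem.Int.band (PySem.Int.bor ((8*A+4*B+2*C+D) >>> (1 : Nat)) ((8*A+4*B+2*C+D) <<< (3 : Nat))) 15 = 8*D+4*A+2*B+C := by
  rcases hA with rfl | rfl <;> rcases hB with rfl | rfl <;> rcases hC with rfl | rfl <;>
    rcases hD with rfl | rfl <;> decide

lemma pvRot2 (A B C D : Int) (hA : A = 0 ∨ A = 1) (hB : B = 0 ∨ B = 1)
    (hC : C = 0 ∨ C = 1) (hD : D = 0 ∨ D = 1) :
    PySem.Int.band (PySem.Int.bor ((8*A+4*B+2*C+D) >>> (2 : Nat)) ((8*A+4*B+2*C+D) <<< (2 : Nat))) 15 = 8*C+4*D+2*A+B := by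
  rcases hA with rfl | rfl <;> rcases hB with rfl | rfl <;> rcases hC with rfl | rfl <;>
    rcases hD with rfl | rfl <;> decide

lemma pvRot3 (A B C D : Int) (hA : A = 0 ∨ A = 1) (hB : B = 0 ∨ B = 1)
    (hC : C = 0 ∨ C = 1) (hD : D = 0 ∨ D = 1) :
    PySem.Int.band (PySem.Int.bor ((8*A+4*B+2*C+D) >>> (3 : Nat)) ((8*A+4*B+2*C+D) <<< (1 : Nat))) 15 = 8*B+4*C+2*D+A := by
  rcases hA with rfl | rfl <;> rcases hB with rfl | rfl <;> rcases hC with rfl | rfl <;>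
    rcases hD with rfl | rfl <;> decide

-- extracting the four bits of a nibble written as 8A+4B+2C+D
lemma pvNibBits (A B C D : Int) (hA : A = 0 ∨ A = 1) (hB : B = 0 ∨ B = 1)
    (hC : C = 0 ∨ C = 1) (hD : D = 0 ∨ D = 1) :
    PySem.Int.band ((8*A+4*B+2*C+D) >>> (3 : Nat)) 1 = A ∧
    PySem.Int.band ((8*A+4*B+2*C+D) >>> (2 : Nat)) 1 = B ∧
    PySem.Int.band ((8*A+4*B+2*C+D) >>> (1 : Nat)) 1 = C ∧
    PySem.Int.band (8*A+4*B+2*C+D) 1 = D := by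
  rcases hA with rfl | rfl <;> rcases hB with rfl | rfl <;> rcases hC with rfl | rfl <;>
    rcases hD with rfl | rfl <;> decide

-- one cycle: B's gather-rotate-scatter equals the branch-free pair-sum over A's step list
lemma pvCycle (j kk r a b c d : Int) (hkk : kk = 0 ∨ kk = 1 ∨ kk = 2) :
    pvBodyB j (kk + 1) r [a, b, c, d] = (pvStepsOf kk [a, b, c, d]).foldl (pvStepB j) r := by
  have hA := pvBit_eq j (23 - a) ▸ pvB_cases j ((23 - a : Int)).toNat
  have hB := pvBit_eq j (23 - b) ▸ pvB_cases j ((23 - b : Int)).toNat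
  have hC := pvBit_eq j (23 - c) ▸ pvB_cases j ((23 - c : Int)).toNat
  have hD := pvBit_eq j (23 - d) ▸ pvB_cases j ((23 - d : Int)).toNat
  have hnib : ((pvBit j (23 - a) * 2 + pvBit j (23 - b)) * 2 + pvBit j (23 - c)) * 2
        + pvBit j (23 - d)
      = 8 * pvBit j (23 - a) + 4 * pvBit j (23 - b) + 2 * pvBit j (23 - c) + pvBit j (23 - d) := by
    ring
  obtain ⟨n3, n2, n1, n0⟩ := pvNibBits _ _ _ _ hA hB hC hD
  rcases hkk with rfl | rfl | rfl
  · simp only [pvBodyB, pvStepsOf, pvStepB, List.foldl_cons, List.foldl_nil,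
      PySem.List.enumerate_cons, PySem.List.enumerate_nil,
      show PySem.List.pyRange 0 4 1 = [0, 1, 2, 3] from by decide, List.map_cons, List.map_nil]
    norm_num [PySem.List.pyGet?, PySem.List.pyIdx?]
    simp only [show Int.toNat 3 = 3 from rfl, show Int.toNat 2 = 2 from rfl,
      show Int.toNat 1 = 1 from rfl, show Int.toNat 0 = 0 from rfl,
      List.getElem_cons_succ, List.getElem_cons_zero]
    rw [hnib]
    simp only [pvRot1 _ _ _ _ hA hB hC hD, (pvNibBits _ _ _ _ hD hA hB hC).1,
      (pvNibBits _ _ _ _ hD hA hB hC).2.1, (pvNibBits _ _ _ _ hD hA hB hC).2.2.1,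
      (pvNibBits _ _ _ _ hD hA hB hC).2.2.2, n3, n2, n1, n0]
    simp only [Int.shiftLeft_eq, one_mul]
    ring
  · simp only [pvBodyB, pvStepsOf, pvStepB, List.foldl_cons, List.foldl_nil,
      PySem.List.enumerate_cons, PySem.List.enumerate_nil,
      show PySem.List.pyRange 0 4 1 = [0, 1, 2, 3] from by decide, List.map_cons, List.map_nil]
    norm_num [PySem.List.pyGet?, PySem.List.pyIdx?]
    simp only [show Int.toNat 3 = 3 from rfl, show Int.toNat 2 = 2 from rfl,
      show Int.toNat 1 = 1 from rfl, show Int.toNat 0 = 0 from rfl,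
      List.getElem_cons_succ, List.getElem_cons_zero]
    rw [hnib]
    simp only [pvRot2 _ _ _ _ hA hB hC hD, (pvNibBits _ _ _ _ hC hD hA hB).1,
      (pvNibBits _ _ _ _ hC hD hA hB).2.1, (pvNibBits _ _ _ _ hC hD hA hB).2.2.1,
      (pvNibBits _ _ _ _ hC hD hA hB).2.2.2, n3, n2, n1, n0]
    simp only [Int.shiftLeft_eq, one_mul]
    ring
  · simp only [pvBodyB, pvStepsOf, pvStepB, List.foldl_cons, List.foldl_nil,
      PySem.List.enumerate_cons, PySem.List.enumerate_nil,
      show PySem.List.pyRange 0 4 1 = [0, 1, 2, 3] from by decide, List.map_cons, List.map_nil]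
    norm_num [PySem.List.pyGet?, PySem.List.pyIdx?]
    simp only [show Int.toNat 3 = 3 from rfl, show Int.toNat 2 = 2 from rfl,
      show Int.toNat 1 = 1 from rfl, show Int.toNat 0 = 0 from rfl,
      List.getElem_cons_succ, List.getElem_cons_zero]
    rw [hnib]
    simp only [pvRot3 _ _ _ _ hA hB hC hD, (pvNibBits _ _ _ _ hB hC hD hA).1,
      (pvNibBits _ _ _ _ hB hC hD hA).2.1, (pvNibBits _ _ _ _ hB hC hD hA).2.2.1,
      (pvNibBits _ _ _ _ hB hC hD hA).2.2.2, n3, n2, n1, n0]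
    simp only [Int.shiftLeft_eq, one_mul]
    ring

-- concrete facts about the table, checked for every admissible twist at once
lemma pvFacts : ∀ t ∈ PySem.List.pyRange (-36) 36 1,
    (((pvSteps t).map Prod.fst).Nodup ∧
      (∀ p ∈ pvSteps t, 0 ≤ p.1 ∧ p.1 ≤ 23 ∧ 0 ≤ p.2 ∧ p.2 ≤ 23)) ∧
    ∀ arr ∈ (PySem.List.pyGet? pvSurface (PySem.Int.floordiv t 3)).getD [], arr.length = 4 := by
  decide

-- sequential conditional edits equal the simultaneous arithmetic pass while the
-- destination bits of the remaining steps still agree with j and destinations are distinct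
lemma pvCore (j : Int) (steps : List (Int × Int)) (r : Int)
    (hbits : ∀ p ∈ steps, pvBit r (23 - p.1) = pvBit j (23 - p.1))
    (hk : ∀ p ∈ steps, 0 ≤ p.1 ∧ p.1 ≤ 23 ∧ 0 ≤ p.2 ∧ p.2 ≤ 23)
    (hnd : (steps.map Prod.fst).Nodup) :
    steps.foldl (pvStepA j) r = steps.foldl (pvStepB j) r := by
  induction steps generalizing r with
  | nil => rfl
  | cons p rest ih =>
    simp only [List.foldl_cons]
    have hkp := hk p (by simp)
    have hsrc := pvB_cases j ((23 - p.2).toNat)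
    have hdst := pvB_cases j ((23 - p.1).toNat)
    have hbp := hbits p (by simp)
    have hstep : pvStepA j r p = pvStepB j r p := by
      unfold pvStepA pvStepB
      simp only [pvBit_eq, Int.shiftLeft_eq, one_mul] at hbp ⊢
      rw [← hbp]
      rcases hsrc with h1 | h1 <;> rcases pvB_cases r ((23 - p.1).toNat) with h2 | h2 <;>
        simp [h1, h2] <;> ring
    rw [hstep]
    have hfresh : p.1 ∉ rest.map Prod.fst := by
      simpa using (List.nodup_cons.mp hnd).1
    apply ih (pvStepB j r p)
      ?_ (fun q hq => hk q (by simp [hq])) (List.nodup_cons.mp hnd).2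
    intro q hq
    have hqne : q.1 ≠ p.1 := by
      intro h; exact hfresh (by simpa [h.symm] using List.mem_map_of_mem (f := Prod.fst) hq)
    have hqk := hk q (by simp [hq])
    have hne : ((23 : Int) - q.1).toNat ≠ ((23 : Int) - p.1).toNat := by omega
    have hbq := hbits q (by simp [hq])
    simp only [pvBit_eq] at hbp hbq ⊢
    have hB : pvStepB j r p
        = r + (pvB j ((23 - p.2 : Int).toNat) - pvB r ((23 - p.1 : Int).toNat))
            * 2 ^ ((23 : Int) - p.1).toNat := by
      unfold pvStepB
      simp only [pvBit_eq, Int.shiftLeft_eq, one_mul]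
      rw [← hbp]
    rw [hB, pvB_update_other r _ _ _
      (by rcases hsrc with h | h <;> omega) (by rcases hsrc with h | h <;> omega) hne]
    exact hbq

lemma pvA_eq (idx twist : Int) :
    move_ep_phase1_func idx twist
      = PySem.Int.floordiv ((pvSteps twist).foldl (pvStepA (pvJ idx)) (pvJ idx)) 2 := by
  unfold move_ep_phase1_func pvSteps pvStepsOf pvJ pvStepA
  rw [PySem.List.foldl_add]
  simp only [foldl_flatMap, List.foldl_map, zero_add]
  rcases PySem.Int.mod_two_eq (((PySem.List.pyRange 0 23 1).map (fun i => pvBit idx i)).sum)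
    with h | h <;>
    rw [PySem.Int.mod_eq_emod_of_pos (by norm_num : (0:Int) < 2)] at h <;> simp [h]

lemma pvPar (idx : Int) :
    (PySem.List.pyRange 0 23 1).foldl (fun p i => PySem.Int.bxor p (pvBit idx i)) 0
      = PySem.Int.mod (((PySem.List.pyRange 0 23 1).map (fun i => pvBit idx i)).sum) 2 := by
  have h := List.foldl_map (f := fun i => pvBit idx i) (g := fun p x => PySem.Int.bxor p x)
    (l := PySem.List.pyRange 0 23 1) (init := (0 : Int))
  rw [← h, pvXorFold _ ?bits 0 (Or.inl rfl), zero_add]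
  case bits =>
    intro x hx
    obtain ⟨i, _, rfl⟩ := List.mem_map.mp hx
    exact pvBit_eq idx i ▸ pvB_cases idx i.toNat

lemma pvBAlt_eq (idx twist : Int) :
    move_ep_phase1_func_alt idx twist
      = PySem.Int.floordiv
          (((PySem.List.pyGet? pvSurface (PySem.Int.floordiv twist 3)).getD []).foldl
            (pvBodyB (pvJ idx) (PySem.Int.mod twist 3 + 1)) (pvJ idx)) 2 := by
  simp only [move_ep_phase1_func_alt, pvJ, pvPar]
  rfl

-- ===== VERDICT (by name: the statement is the Claim_ definition above) =====
theorem move_ep_phase1_func_spec : Claim_equal_move_ep_phase1_func := by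
  intro idx twist _ hpre
  unfold Spec_move_ep_phase1_func
  obtain ⟨⟨hnd, hkb⟩, hshape⟩ :=
    pvFacts twist (PySem.List.mem_pyRange_one.mpr ⟨hpre.1, hpre.2⟩)
  rw [pvA_eq, pvBAlt_eq]
  refine congrArg (fun z => PySem.Int.floordiv z 2) ?_
  have hkk : PySem.Int.mod twist 3 = 0 ∨ PySem.Int.mod twist 3 = 1 ∨ PySem.Int.mod twist 3 = 2 := by
    have h1 := PySem.Int.mod_nonneg twist (by norm_num : (0:Int) < 3)
    have h2 := PySem.Int.mod_lt twist (by norm_num : (0:Int) < 3)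
    omega
  calc (pvSteps twist).foldl (pvStepA (pvJ idx)) (pvJ idx)
      = (pvSteps twist).foldl (pvStepB (pvJ idx)) (pvJ idx) :=
        pvCore _ _ _ (fun _ _ => rfl) hkb hnd
    _ = ((PySem.List.pyGet? pvSurface (PySem.Int.floordiv twist 3)).getD []).foldl
          (fun r arr => (pvStepsOf (PySem.Int.mod twist 3) arr).foldl (pvStepB (pvJ idx)) r)
          (pvJ idx) := foldl_flatMap _ _ _ _
    _ = ((PySem.List.pyGet? pvSurface (PySem.Int.floordiv twist 3)).getD []).foldl
          (pvBodyB (pvJ idx) (PySem.Int.mod twist 3 + 1)) (pvJ idx) := by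
        refine PySem.List.foldl_congr_mem _ _ _ _ ?_
        intro r arr harr
        obtain ⟨a, b, c, d, rfl⟩ : ∃ a b c d, arr = [a, b, c, d] := by
          have hl := hshape arr harr
          rcases arr with _ | ⟨a, _ | ⟨b, _ | ⟨c, _ | ⟨d, _ | ⟨e, t⟩⟩⟩⟩⟩
          · simp at hl
          · simp at hl
          · simp at hl
          · simp at hl
          · exact ⟨a, b, c, d, rfl⟩
          · simp at hl
        exact (pvCycle (pvJ idx) _ r a b c d hkk).symm
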